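-- pv_equiv track=rewrite | github.com/freelabsteplov/KaMaz | Pyton_script/unreal_tools/ensure_snowtest_wheel_trace_component.py | _find_parent_entry
-- ===== SOURCE A (Python) =====
-- def _find_parent_entry(entries):
--     for entry in entries:
--         if entry["object_name"] == "VehicleMesh" or "VehicleMesh" in entry["display_name"]:
--             return entry
--     for entry in entries:
--         if "DefaultSceneRoot" in entry["display_name"] or entry["object_name"] == "DefaultSceneRoot":
--             return entry
--     return entries[0] if entries else None
-- ===== SOURCE B (Python) =====
-- def _find_parent_entry(entries):
--     candidate = None
--     for entry in entries:
--         if entry["object_name"] == "VehicleMesh" or "VehicleMesh" in entry["display_name"]: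
--             return entry
--         if candidate is None and ("DefaultSceneRoot" in entry["display_name"] or entry["object_name"] == "DefaultSceneRoot"):
--             candidate = entry
--     if candidate is not None:
--         return candidate
--     return entries[0] if entries else None
-- ===== Notes on version B (the rewrite author's own statement) =====
-- stated objective: alternative
-- what changed: Replaced A's two sequential scans by one single pass that returns a VehicleMesh match immediately and remembers the first DefaultSceneRoot match in a variable, falling back to entries[0].
import Mathlib
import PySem

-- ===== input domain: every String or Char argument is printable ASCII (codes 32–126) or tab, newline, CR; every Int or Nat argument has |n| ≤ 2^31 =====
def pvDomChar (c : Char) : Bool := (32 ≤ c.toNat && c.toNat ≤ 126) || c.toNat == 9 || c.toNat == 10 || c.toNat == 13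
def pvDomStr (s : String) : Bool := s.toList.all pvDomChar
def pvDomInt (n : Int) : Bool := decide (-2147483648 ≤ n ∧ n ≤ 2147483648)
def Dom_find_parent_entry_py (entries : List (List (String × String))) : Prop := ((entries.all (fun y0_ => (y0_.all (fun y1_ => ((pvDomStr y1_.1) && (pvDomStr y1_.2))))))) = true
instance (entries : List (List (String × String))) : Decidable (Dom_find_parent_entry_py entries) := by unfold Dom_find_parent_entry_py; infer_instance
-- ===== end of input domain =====

-- B replaces A's two sequential scans by one single pass that keeps the first
-- DefaultSceneRoot candidate in a variable (objective: alternative decomposition).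
-- A raises KeyError when it reaches an entry missing "object_name"/"display_name" before
-- returning; Pre_ excludes exactly those inputs (port lookups use getD "", exact under Pre_).

-- ===== PORT A =====
def fpeGet (e : List (String × String)) (k : String) : String :=
  (PySem.Dict.ofList e).getD k ""

def fpeIsVM (e : List (String × String)) : Bool :=
  fpeGet e "object_name" == "VehicleMesh" || PySem.Str.isIn "VehicleMesh" (fpeGet e "display_name")

def fpeIsDSR (e : List (String × String)) : Bool :=
  PySem.Str.isIn "DefaultSceneRoot" (fpeGet e "display_name") || fpeGet e "object_name" == "DefaultSceneRoot"

-- first for-loop of A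
def fpeLoop1 : List (List (String × String)) → Option (List (String × String))
  | [] => none
  | e :: rest => if fpeIsVM e then some e else fpeLoop1 rest

-- second for-loop of A
def fpeLoop2 : List (List (String × String)) → Option (List (String × String))
  | [] => none
  | e :: rest => if fpeIsDSR e then some e else fpeLoop2 rest

def find_parent_entry_py (entries : List (List (String × String))) : Option (List (String × String)) :=
  match fpeLoop1 entries with
  | some e => some e
  | none =>
    match fpeLoop2 entries with
    | some e => some e
    | none => entries.head?   -- entries[0] if entries else None

-- ===== PORT B =====
-- the single for-loop of B, carrying the candidate variable
def fpeScan : List (List (String × String)) → Option (List (String × String)) → Option (List (String × String))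
  | [], cand => cand
  | e :: rest, cand =>
    if fpeIsVM e then some e
    else if cand.isNone && fpeIsDSR e then fpeScan rest (some e)
    else fpeScan rest cand

def find_parent_entry_py_alt (entries : List (List (String × String))) : Option (List (String × String)) :=
  match fpeScan entries none with
  | some e => some e
  | none => entries.head?   -- entries[0] if entries else None

-- ===== PRECONDITION & SPEC =====
-- Pre_-only helpers: which entries have both keys, and where A's first loop returns.
def fpeOK (e : List (String × String)) : Bool :=
  (PySem.Dict.ofList e).contains "object_name" && (PySem.Dict.ofList e).contains "display_name"

def fpeObjVM (e : List (String × String)) : Bool :=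
  (PySem.Dict.ofList e).get? "object_name" == some "VehicleMesh"

-- Pre_: A (and B) raise KeyError iff some entry lacking a key is reached before an early
-- VehicleMesh return; every entry missing a key must be preceded by a returning entry
-- (or itself return on its present object_name) for A to return normally.
def Pre_find_parent_entry_py (entries : List (List (String × String))) : Prop :=
  ∀ i, i < entries.length → fpeOK (entries.getD i []) = false →
    ∃ j, j < i + 1 ∧ (fpeObjVM (entries.getD j []) = true ∨
      (j < i ∧ (fpeOK (entries.getD j []) && fpeIsVM (entries.getD j [])) = true))
instance (entries : List (List (String × String))) : Decidable (Pre_find_parent_entry_py entries) := by unfold Pre_find_parent_entry_py; infer_instance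
def pvWitness_find_parent_entry_py : (List (List (String × String))) :=
  [[("object_name", "Body"), ("display_name", "Body (DefaultSceneRoot)")]]

def Spec_find_parent_entry_py (entries : List (List (String × String))) (out : Option (List (String × String))) : Prop := out = find_parent_entry_py_alt entries
instance (entries : List (List (String × String))) (out : Option (List (String × String))) : Decidable (Spec_find_parent_entry_py entries out) := by unfold Spec_find_parent_entry_py; infer_instance

-- ===== CLAIM (what is proved, stated in full; the proofs are below) =====
def Claim_equal_find_parent_entry_py : Prop := ∀ (entries : List (List (String × String))), Dom_find_parent_entry_py entries → Pre_find_parent_entry_py entries → Spec_find_parent_entry_py entries (find_parent_entry_py entries)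

-- ===== LEMMAS AND PROOFS =====
-- B's scan = A's first loop, else the carried candidate, else A's second loop.
lemma fpeScan_eq (l : List (List (String × String))) (cand : Option (List (String × String))) :
    fpeScan l cand =
      match fpeLoop1 l with
      | some e => some e
      | none => match cand with
        | some c => some c
        | none => fpeLoop2 l := by
  induction l generalizing cand with
  | nil => cases cand <;> simp [fpeScan, fpeLoop1, fpeLoop2]
  | cons e rest ih =>
    simp only [fpeScan, fpeLoop1, fpeLoop2]
    by_cases hvm : fpeIsVM e
    · simp [hvm]
    · cases cand with
      | some c => simp [hvm, ih]
      | none =>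
        by_cases hdsr : fpeIsDSR e
        · simp [hvm, hdsr, ih]
        · simp [hvm, hdsr, ih]

-- ===== VERDICT (by name: the statement is the Claim_ definition above) =====
theorem find_parent_entry_py_spec : Claim_equal_find_parent_entry_py := by
  intro entries _ _
  unfold Spec_find_parent_entry_py find_parent_entry_py find_parent_entry_py_alt
  rw [fpeScan_eq]
  cases fpeLoop1 entries <;> cases fpeLoop2 entries <;> simp
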